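-- pv_equiv track=rewrite | github.com/haythamafify/03---Find-Longest-Word-in-a-String | main.py | longest_word_in
-- ===== SOURCE A (Python) =====
-- def longest_word_in(sentence):
--     words = sentence.split()
--     count = 0
--     longestWors = ""
--     for item in words:
--         if (len(item) > count):
--             count = len(item)
--
--             longestWors = item
--
--     return longestWors
-- ===== SOURCE B (Python) =====
-- def longest_word_in(sentence):
--     words = sentence.split()
--     if not words:
--         return ""
--     return sorted(words, key=len, reverse=True)[0]
-- ===== Notes on version B (the rewrite author's own statement) =====
-- stated objective: alternative
-- what changed: B replaces A's running-max scan with its accumulator pair by sorting the word list stably by descending length and taking the front element (stability preserves the first-longest tie-break).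
import Mathlib
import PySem

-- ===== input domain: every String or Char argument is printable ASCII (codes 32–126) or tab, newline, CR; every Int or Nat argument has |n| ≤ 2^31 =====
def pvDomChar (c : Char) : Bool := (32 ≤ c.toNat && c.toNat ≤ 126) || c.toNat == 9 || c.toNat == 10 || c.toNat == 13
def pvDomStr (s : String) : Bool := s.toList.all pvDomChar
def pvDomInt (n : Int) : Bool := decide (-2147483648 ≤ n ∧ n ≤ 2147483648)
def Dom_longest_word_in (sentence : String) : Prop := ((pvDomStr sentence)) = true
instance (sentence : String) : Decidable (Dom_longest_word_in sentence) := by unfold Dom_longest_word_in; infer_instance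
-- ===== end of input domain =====

-- B sorts the words stably by descending length and takes the front element instead of A's
-- running-max scan; a structural alternative of similar size, not claimed faster.

-- ===== PORT A =====
def longest_word_in (sentence : String) : String :=
  let words := PySem.Str.split₀ sentence
  (words.foldl
    (fun (st : Int × String) item =>
      if st.1 < PySem.Str.len item then (PySem.Str.len item, item) else st)
    (0, "")).2

-- ===== PORT B =====
def longest_word_in_alt (sentence : String) : String :=
  let words := PySem.Str.split₀ sentence
  match PySem.List.sorted words (fun w => PySem.Str.len w) true with
  | [] => ""
  | m :: _ => m

-- ===== PRECONDITION & SPEC =====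
def Spec_longest_word_in (sentence : String) (out : String) : Prop := out = longest_word_in_alt sentence
instance (sentence : String) (out : String) : Decidable (Spec_longest_word_in sentence out) := by unfold Spec_longest_word_in; infer_instance

-- ===== CLAIM (what is proved, stated in full; the proofs are below) =====
def Claim_equal_longest_word_in : Prop := ∀ (sentence : String), Dom_longest_word_in sentence → Spec_longest_word_in sentence (longest_word_in sentence)

-- ===== LEMMAS AND PROOFS =====

-- the invariant linking A's accumulator (count, longest) with B's insertion-sort accumulator
def pvInv (st : Int × String) (acc : List String) : Prop :=
  (acc = [] ∧ st = (0, "")) ∨ (∃ t, acc = st.2 :: t ∧ st.1 = PySem.Str.len st.2)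

theorem pvLenZero (s : String) (h : PySem.Str.len s = 0) : s = "" := by
  have h' : s.toList.length = 0 := by simpa [PySem.Str.len] using h
  have h2 : s.toList = [] := List.eq_nil_of_length_eq_zero h'
  have := congrArg String.ofList h2
  simpa using this

theorem pvStep (ws : List String) : ∀ (st : Int × String) (acc : List String),
    pvInv st acc →
    pvInv
      (ws.foldl (fun (st : Int × String) item =>
        if st.1 < PySem.Str.len item then (PySem.Str.len item, item) else st) st)
      (ws.foldl (fun acc x =>
        PySem.List.insertBy (fun a b => decide (PySem.Str.len b < PySem.Str.len a)) x acc) acc) := by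
  induction ws with
  | nil => intro st acc h; simpa using h
  | cons x ws ih =>
    intro st acc h
    simp only [List.foldl_cons]
    apply ih
    rcases h with ⟨hacc, hst⟩ | ⟨t, hacc, hlen⟩
    · subst hacc hst
      show pvInv _ [x]
      by_cases hx : (0 : Int) < PySem.Str.len x
      · rw [if_pos hx]; exact Or.inr ⟨[], rfl, rfl⟩
      · rw [if_neg hx]
        have hx0 : PySem.Str.len x = 0 := by
          have : (0 : Int) ≤ PySem.Str.len x := by simp [PySem.Str.len]
          omega
        have hxe : x = "" := pvLenZero x hx0
        subst hxe
        exact Or.inr ⟨[], rfl, rfl⟩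
    · subst hacc
      by_cases hx : st.1 < PySem.Str.len x
      · have hb : decide (PySem.Str.len st.2 < PySem.Str.len x) = true := by
          rw [← hlen]; exact decide_eq_true hx
        rw [if_pos hx]
        refine Or.inr ⟨st.2 :: t, ?_, rfl⟩
        simp only [PySem.List.insertBy, hb, if_true]
      · have hb : decide (PySem.Str.len st.2 < PySem.Str.len x) = false := by
          rw [← hlen]; exact decide_eq_false hx
        rw [if_neg hx]
        refine Or.inr ⟨PySem.List.insertBy
          (fun a b => decide (PySem.Str.len b < PySem.Str.len a)) x t, ?_, hlen⟩
        simp only [PySem.List.insertBy, hb, Bool.false_eq_true, if_false]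

theorem pvMain (ws : List String) :
    (ws.foldl (fun (st : Int × String) item =>
        if st.1 < PySem.Str.len item then (PySem.Str.len item, item) else st) (0, "")).2 =
    (match PySem.List.sorted ws (fun w => PySem.Str.len w) true with
      | [] => ""
      | m :: _ => m) := by
  rw [PySem.List.sorted_rev_eq_foldl_insertBy]
  have := pvStep ws (0, "") [] (Or.inl ⟨rfl, rfl⟩)
  rcases this with ⟨hacc, hst⟩ | ⟨t, hacc, _⟩
  · rw [hacc, hst]
  · rw [hacc]

-- ===== VERDICT (by name: the statement is the Claim_ definition above) =====
theorem longest_word_in_spec : Claim_equal_longest_word_in := by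
  intro sentence _
  unfold Spec_longest_word_in longest_word_in longest_word_in_alt
  exact pvMain _
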